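-- pv_equiv track=rewrite | github.com/gahjelle/advent_of_code | 2019/17_set_and_forget/aoc17.py | compress_directions
-- ===== SOURCE A (Python) =====
-- def compress_directions(directions):
--     compressed = []
--     counter = 0
--     for direction in directions:
--         if direction == "F":
--             counter += 1
--         else:
--             if counter > 0:
--                 compressed.append(str(counter))
--                 counter = 0
--             compressed.append(direction)
--     compressed.append(str(counter))
--
--     return compressed
-- ===== SOURCE B (Python) =====
-- def compress_directions(directions):
--     # Run-length view: walk maximal runs of equal tokens; an "F" run becomes its
--     # length, any other run is copied verbatim.  A's final unconditional counter
--     # flush means the result always ends with a count, so append "0" when the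
--     # input is empty or does not end in "F" (matching A exactly).
--     ds = list(directions)
--     compressed = []
--     i, n = 0, len(ds)
--     while i < n:
--         j = i + 1
--         while j < n and ds[j] == ds[i]:
--             j += 1
--         if ds[i] == "F":
--             compressed.append(str(j - i))
--         else:
--             compressed.extend(ds[i:j])
--         i = j
--     if n == 0 or ds[-1] != "F":
--         compressed.append("0")
--     return compressed
-- ===== Notes on version B (the rewrite author's own statement) =====
-- stated objective: alternative
-- what changed: Replaces A's element-wise counter/flush state machine with a run-length scan over maximal runs of equal tokens (an F-run becomes its length, other runs are copied), plus one final count append as A always produces.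
import Mathlib
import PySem

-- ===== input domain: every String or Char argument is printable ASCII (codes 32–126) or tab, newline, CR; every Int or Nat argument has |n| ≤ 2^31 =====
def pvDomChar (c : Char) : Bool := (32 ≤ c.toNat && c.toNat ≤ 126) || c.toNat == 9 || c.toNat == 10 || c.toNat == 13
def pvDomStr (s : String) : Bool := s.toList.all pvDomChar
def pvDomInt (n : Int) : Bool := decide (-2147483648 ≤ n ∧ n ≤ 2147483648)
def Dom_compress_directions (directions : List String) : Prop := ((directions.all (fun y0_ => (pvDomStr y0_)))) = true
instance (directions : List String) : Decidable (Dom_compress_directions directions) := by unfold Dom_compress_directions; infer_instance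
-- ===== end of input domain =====

-- B replaces A's element-wise counter/flush state machine with a scan over
-- maximal runs of equal tokens (alternative decomposition, same cost).

-- ===== PORT A =====
-- literal transliteration of A: fold over the elements with state (compressed, counter)
def compress_directions (directions : List String) : List String :=
  let st := directions.foldl
    (fun (st : List String × Int) direction =>
      if direction = "F" then (st.1, st.2 + 1)
      else
        let st := if st.2 > 0 then (st.1 ++ [PySem.Int.toStr st.2], (0 : Int)) else st
        (st.1 ++ [direction], st.2))
    ([], 0)
  st.1 ++ [PySem.Int.toStr st.2]

-- ===== PORT B =====
-- the outer while loop of Source B: each step consumes one maximal run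
-- (takeWhile/dropWhile = the inner `while j < n and ds[j] == ds[i]` scan)
def pvRunLoop : List String → List String
  | [] => []
  | d :: rest =>
    let run := rest.takeWhile (fun x => x = d)
    let rest' := rest.dropWhile (fun x => x = d)
    (if d = "F" then [PySem.Int.toStr ((run.length : Int) + 1)] else d :: run) ++ pvRunLoop rest'
termination_by l => l.length
decreasing_by
  simp only [List.length_cons]
  exact Nat.lt_succ_of_le (List.length_dropWhile_le _ _)

def compress_directions_alt (directions : List String) : List String :=
  pvRunLoop directions ++
    (if directions.getLast? = some "F" then [] else ["0"])  -- `if n == 0 or ds[-1] != "F"` of Source B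

-- ===== PRECONDITION & SPEC =====
def Spec_compress_directions (directions : List String) (out : List String) : Prop := out = compress_directions_alt directions
instance (directions : List String) (out : List String) : Decidable (Spec_compress_directions directions out) := by unfold Spec_compress_directions; infer_instance

-- ===== CLAIM (what is proved, stated in full; the proofs are below) =====
def Claim_equal_compress_directions : Prop := ∀ (directions : List String), Dom_compress_directions directions → Spec_compress_directions directions (compress_directions directions)

-- ===== LEMMAS AND PROOFS =====

-- A's loop in continuation form: pvG xs c = "finish A's loop on xs from counter c"
def pvG : List String → Int → List String
  | [], c => [PySem.Int.toStr c]
  | d :: rest, c =>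
    if d = "F" then pvG rest (c + 1)
    else (if c > 0 then [PySem.Int.toStr c] else []) ++ d :: pvG rest 0

-- A's fold from state (acc, c) with 0 ≤ c, then the final flush, equals acc ++ pvG xs c
lemma foldA_eq_pvG (xs : List String) : ∀ (acc : List String) (c : Int), 0 ≤ c →
    (let st := xs.foldl
      (fun (st : List String × Int) direction =>
        if direction = "F" then (st.1, st.2 + 1)
        else
          let st := if st.2 > 0 then (st.1 ++ [PySem.Int.toStr st.2], (0 : Int)) else st
          (st.1 ++ [direction], st.2))
      (acc, c)
     st.1 ++ [PySem.Int.toStr st.2]) = acc ++ pvG xs c := by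
  induction xs with
  | nil => intro acc c _; simp [pvG]
  | cons d rest ih =>
    intro acc c hc
    by_cases hF : d = "F"
    · simpa [pvG, hF] using ih acc (c + 1) (by omega)
    · by_cases hpos : c > 0
      · simpa [pvG, hF, hpos] using ih (acc ++ [PySem.Int.toStr c] ++ [d]) 0 le_rfl
      · have hc0 : c = 0 := by omega
        subst hc0
        simpa [pvG, hF] using ih (acc ++ [d]) 0 le_rfl

lemma pvRunLoop_cons_ne (d : String) (r : List String) (hF : d ≠ "F") :
    pvRunLoop (d :: r) = d :: pvRunLoop r := by
  cases r with
  | nil => simp [pvRunLoop, hF]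
  | cons e r2 =>
    by_cases he : e = d
    · subst he
      rw [pvRunLoop, pvRunLoop]
      simp [hF, List.takeWhile, List.dropWhile]
    · rw [pvRunLoop]
      simp [hF, he]

lemma altB_cons_ne (d : String) (r : List String) (hF : d ≠ "F") :
    compress_directions_alt (d :: r) = d :: compress_directions_alt r := by
  cases r with
  | nil => simp [compress_directions_alt, pvRunLoop, hF]
  | cons e r2 =>
    unfold compress_directions_alt
    rw [pvRunLoop_cons_ne d _ hF]
    simp [List.getLast?_cons_cons]

lemma getLast?_cons_ne_nil {α : Type} (a : α) (t : List α) (ht : t ≠ []) :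
    (a :: t).getLast? = t.getLast? := by
  cases t with
  | nil => exact absurd rfl ht
  | cons b t2 => exact List.getLast?_cons_cons ..

lemma getLast?_dropWhile {α : Type} (p : α → Bool) (l : List α)
    (h : l.dropWhile p ≠ []) : (l.dropWhile p).getLast? = l.getLast? := by
  induction l with
  | nil => simp at h
  | cons a t ih =>
    by_cases hp : p a
    · rw [List.dropWhile_cons_of_pos hp] at h ⊢
      have ht : t ≠ [] := by
        intro hte; subst hte; simp at h
      rw [ih h, getLast?_cons_ne_nil a t ht]
    · simp [List.dropWhile_cons_of_neg hp]

lemma pvG_eq_altB (xs : List String) :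
    pvG xs 0 = compress_directions_alt xs ∧
    ∀ c : Int, 0 < c →
      pvG xs c =
        PySem.Int.toStr (c + ((xs.takeWhile (fun x => x = "F")).length : Int)) ::
          (if xs.dropWhile (fun x => x = "F") = [] then []
           else compress_directions_alt (xs.dropWhile (fun x => x = "F"))) := by
  induction xs with
  | nil =>
    constructor
    · show pvG [] 0 = compress_directions_alt []
      simp [pvG, compress_directions_alt, pvRunLoop]
      decide
    · intro c _; simp [pvG]
  | cons d r ih =>
    by_cases hF : d = "F"
    · subst hF
      have hQ := ih.2
      constructor
      · -- pvG ("F"::r) 0 = pvG r 1, and altB ("F"::r) folds the leading F-run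
        have h1 := hQ 1 (by norm_num)
        rw [show pvG ("F" :: r) 0 = pvG r 1 by simp [pvG]]
        rw [h1]
        unfold compress_directions_alt
        rw [pvRunLoop]
        by_cases hy : r.dropWhile (fun x => x = "F") = []
        · -- everything is an "F": last element is "F"
          have hlast : ("F" :: r).getLast? = some "F" := by
            have : ∀ l : List String, l.dropWhile (fun x => x = "F") = [] →
                ("F" :: l).getLast? = some "F" := by
              intro l
              induction l with
              | nil => simp
              | cons a t iht =>
                intro hd
                by_cases ha : a = "F"
                · subst ha
                  rw [List.dropWhile_cons_of_pos (by simp)] at hd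
                  have := iht hd
                  simpa [List.getLast?_cons_cons] using this
                · rw [List.dropWhile_cons_of_neg (by simp [ha])] at hd
                  simp at hd
            exact this r hy
          rw [hy, hlast]
          simp [pvRunLoop]
          congr 1
          omega
        · have hlast : ("F" :: r).getLast? = (r.dropWhile (fun x => x = "F")).getLast? := by
            have hr : r ≠ [] := by
              intro hre; subst hre; simp at hy
            rw [getLast?_dropWhile _ _ hy, getLast?_cons_ne_nil _ _ hr]
          simp only [if_neg hy, if_true]
          rw [hlast]
          simp only [List.cons_append, List.nil_append]
          congr 2
          omega
      · intro c hc
        have h1 := hQ (c + 1) (by omega)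
        rw [show pvG ("F" :: r) c = pvG r (c + 1) by simp [pvG]]
        rw [h1]
        rw [List.takeWhile_cons_of_pos (by simp), List.dropWhile_cons_of_pos (by simp)]
        congr 2
        simp only [List.length_cons]
        push_cast
        ring
    · constructor
      · rw [show pvG (d :: r) 0 = d :: pvG r 0 by simp [pvG, hF]]
        rw [ih.1, altB_cons_ne d r hF]
      · intro c hc
        rw [show pvG (d :: r) c = PySem.Int.toStr c :: d :: pvG r 0 by simp [pvG, hF, hc]]
        rw [List.takeWhile_cons_of_neg (by simp [hF]), List.dropWhile_cons_of_neg (by simp [hF])]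
        simp only [List.length_nil, Int.natCast_zero, add_zero]
        rw [if_neg (by simp)]
        rw [ih.1, altB_cons_ne d r hF]

-- ===== VERDICT (by name: the statement is the Claim_ definition above) =====
theorem compress_directions_spec : Claim_equal_compress_directions := by
  intro directions _
  unfold Spec_compress_directions compress_directions
  rw [foldA_eq_pvG directions [] 0 le_rfl]
  simpa using (pvG_eq_altB directions).1
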